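-- pv_equiv track=rewrite | github.com/elkebir-group/PCCH | simulation/sim_script.py | make_paths
-- ===== SOURCE A (Python) =====
-- def make_paths(site, partition):
--     paths =[]
--     init_seq = [chr(i+ord('a')) for i in range(site)]
--     init_str = init_seq[:2]
--     for p in range(len(partition)):
--         pos = sum(partition[:p])
--         pstr = init_str + [ init_seq[(i + 2 + pos)%site] for i in range(partition[p])]
--         init_str = pstr[-2:]
--         paths.append(pstr)
--     return paths
-- ===== SOURCE B (Python) =====
-- def make_paths(site, partition):
--     # One pass with a running prefix sum (no re-summing of partition[:p]); each path's
--     # new characters form a contiguous circular run of the alphabet, built by list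
--     # slicing/repetition instead of a per-character loop.
--     paths = []
--     alphabet = [chr(97 + i) for i in range(site)]
--     prev2 = alphabet[:2]
--     pos = 0
--     for cnt in partition:
--         if cnt <= 0:
--             seg = []
--         else:
--             start = (2 + pos) % site
--             if cnt <= site - start:
--                 seg = alphabet[start:start + cnt]
--             else:
--                 q, r = divmod(cnt - (site - start), site)
--                 seg = alphabet[start:] + alphabet * q + alphabet[:r]
--         path = prev2 + seg
--         pos += cnt
--         prev2 = path[-2:]
--         paths.append(path)
--     return paths
-- ===== Notes on version B (the rewrite author's own statement) =====
-- stated objective: alternative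
-- what changed: B makes one pass keeping a running prefix sum of the partition (instead of re-summing partition[:p] for every p) and builds each path's new characters as a circular run of the alphabet by list slicing/repetition instead of a per-character loop.
-- outside the precondition, e.g. on make_paths(55200, [1]): A returns [['a', 'b', 'c']], B returns [['a', 'b', 'c']]
import Mathlib
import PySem

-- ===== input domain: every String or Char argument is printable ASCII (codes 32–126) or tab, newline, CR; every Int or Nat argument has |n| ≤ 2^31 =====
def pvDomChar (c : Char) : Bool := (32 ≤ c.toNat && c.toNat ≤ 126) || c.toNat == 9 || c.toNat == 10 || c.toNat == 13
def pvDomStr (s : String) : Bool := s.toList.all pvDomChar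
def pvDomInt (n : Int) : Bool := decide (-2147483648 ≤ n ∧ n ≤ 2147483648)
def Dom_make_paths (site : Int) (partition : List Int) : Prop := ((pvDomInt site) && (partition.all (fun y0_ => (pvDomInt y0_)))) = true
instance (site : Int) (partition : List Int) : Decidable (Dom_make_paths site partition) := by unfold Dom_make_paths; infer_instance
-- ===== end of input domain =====

-- Alternative implementation: B replaces A's per-iteration re-summing of partition[:p]
-- by a running prefix sum and builds each path's new characters as a circular run of the
-- alphabet by list slicing/repetition instead of a per-character loop.


-- ===== PORT A =====
-- init_seq = [chr(i + ord('a')) for i in range(site)]; chr is hand-ported as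
-- Char.ofNat — exact for the code points reachable under Pre_make_paths
-- (97 ≤ i + 97 ≤ 55295 < 0xD800, all valid scalar values).
def mpInitSeq (site : Int) : List String :=
  (PySem.List.pyRange 0 site 1).map (fun i => String.ofList [Char.ofNat (i + 97).toNat])

-- one iteration of A's 'for p in range(len(partition))' loop; state = (paths, init_str)
def mpStepA (site : Int) (partition : List Int)
    (st : List (List String) × List String) (p : Int) :
    List (List String) × List String :=
  let pos := (PySem.List.slice partition (some 0) (some p)).sum
  let pstr := st.2 ++ (PySem.List.pyRange 0 (PySem.List.pyGetD partition p 0) 1).map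
      (fun i => PySem.List.pyGetD (mpInitSeq site) (PySem.Int.mod (i + 2 + pos) site) "")
  (st.1 ++ [pstr], PySem.List.slice pstr (some (-2)) none)

def make_paths (site : Int) (partition : List Int) : List (List String) :=
  ((PySem.List.pyRange 0 (partition.length : Int) 1).foldl (mpStepA site partition)
    ([], PySem.List.slice (mpInitSeq site) none (some 2))).1

-- ===== PORT B =====
-- alphabet = [chr(97 + i) for i in range(site)]
def mpAlphabet (site : Int) : List String :=
  (PySem.List.pyRange 0 site 1).map (fun i => String.ofList [Char.ofNat (97 + i).toNat])

-- B's in-loop computation of seg (the branch on cnt, then on whether the run wraps);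
-- Python's 'alphabet * q' (q ≥ 0 whenever this branch is reached with site > 0) is
-- ported as (List.replicate q.toNat alphabet).flatten
def mpSeg (site : Int) (alphabet : List String) (pos cnt : Int) : List String :=
  if cnt ≤ 0 then []
  else if cnt ≤ site - PySem.Int.mod (2 + pos) site then
    PySem.List.slice alphabet (some (PySem.Int.mod (2 + pos) site)) (some (PySem.Int.mod (2 + pos) site + cnt))
  else
    PySem.List.slice alphabet (some (PySem.Int.mod (2 + pos) site)) none
      ++ (List.replicate (PySem.Int.floordiv (cnt - (site - PySem.Int.mod (2 + pos) site)) site).toNat alphabet).flatten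
      ++ PySem.List.slice alphabet none (some (PySem.Int.mod (cnt - (site - PySem.Int.mod (2 + pos) site)) site))

-- one iteration of B's 'for cnt in partition' loop; state = (paths, prev2, pos)
def mpStepB (site : Int) (st : List (List String) × List String × Int) (cnt : Int) :
    List (List String) × List String × Int :=
  let path := st.2.1 ++ mpSeg site (mpAlphabet site) st.2.2 cnt
  (st.1 ++ [path], PySem.List.slice path (some (-2)) none, st.2.2 + cnt)

def make_paths_alt (site : Int) (partition : List Int) : List (List String) :=
  (partition.foldl (mpStepB site) ([], PySem.List.slice (mpAlphabet site) none (some 2), 0)).1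

-- ===== PRECONDITION & SPEC =====
-- Pre_ excludes: (a) site ≤ 0 together with some positive entry, where A raises
-- (ZeroDivisionError for site = 0, IndexError for site < 0); (b) site > 55199, where
-- Python's chr either raises (ValueError above 0x10FFFF) or can produce surrogate code
-- points (≥ 0xD800) whose strings a Lean String cannot represent — on such inputs B
-- computes the same paths wherever A returns a representable value (see cites).
def Pre_make_paths (site : Int) (partition : List Int) : Prop :=
  (0 < site ∧ site ≤ 55199) ∨ (site ≤ 0 ∧ ∀ x ∈ partition, x ≤ 0)
instance (site : Int) (partition : List Int) : Decidable (Pre_make_paths site partition) := by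
  unfold Pre_make_paths; infer_instance
def pvWitness_make_paths : Int × List Int := (3, [2, 0, 4])

def Spec_make_paths (site : Int) (partition : List Int) (out : List (List String)) : Prop := out = make_paths_alt site partition
instance (site : Int) (partition : List Int) (out : List (List String)) : Decidable (Spec_make_paths site partition out) := by unfold Spec_make_paths; infer_instance

-- ===== CLAIM (what is proved, stated in full; the proofs are below) =====
def Claim_equal_make_paths : Prop := ∀ (site : Int) (partition : List Int), Dom_make_paths site partition → Pre_make_paths site partition → Spec_make_paths site partition (make_paths site partition)

-- ===== LEMMAS AND PROOFS =====

-- the two alphabets are the same list (chr(i+97) vs chr(97+i))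
theorem mp_init_alpha (site : Int) : mpInitSeq site = mpAlphabet site := by
  simp [mpInitSeq, mpAlphabet, add_comm]

-- a run of consecutive indices that stays inside the alphabet is a plain drop/take
theorem mp_run_flat (xs : List String) (s n : Nat) (h : s + n ≤ xs.length) :
    (List.range n).map (fun (k : Nat) => PySem.List.pyGetD xs (((k : Int) + (s : Int)) % (xs.length : Int)) "")
    = (xs.drop s).take n := by
  apply List.ext_getElem
  · simp; omega
  · intro k h1 h2
    simp only [List.getElem_map, List.getElem_range, List.getElem_take, List.getElem_drop]
    have hk : k < n := by simpa using h1
    have he : ((k : Int) + (s : Int)) % (xs.length : Int) = ((k + s : Nat) : Int) := by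
      rw [Int.emod_eq_of_lt (by positivity) (by omega)]
      push_cast
      ring
    rw [he, PySem.List.pyGetD_natCast, List.getD_eq_getElem _ _ (by omega)]
    congr 1
    omega

-- q full cycles of the alphabet followed by a partial one, starting at offset 0
theorem mp_cyc (xs : List String) (q r : Nat) (hr : r ≤ xs.length) :
    (List.range (q * xs.length + r)).map (fun (k : Nat) => PySem.List.pyGetD xs ((k : Int) % (xs.length : Int)) "")
    = (List.replicate q xs).flatten ++ xs.take r := by
  induction q with
  | zero =>
    have := mp_run_flat xs 0 r (by omega)
    simpa using this
  | succ q ih =>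
    have hsplit : (q + 1) * xs.length + r = xs.length + (q * xs.length + r) := by ring
    rw [hsplit, List.range_add, List.map_append, List.map_map]
    have h1 : (List.range xs.length).map (fun (k : Nat) => PySem.List.pyGetD xs ((k : Int) % (xs.length : Int)) "") = xs := by
      have := mp_run_flat xs 0 xs.length (by omega)
      simpa using this
    have h2 : (List.range (q * xs.length + r)).map
        ((fun (k : Nat) => PySem.List.pyGetD xs ((k : Int) % (xs.length : Int)) "") ∘ (fun x => xs.length + x))
        = (List.replicate q xs).flatten ++ xs.take r := by
      rw [← ih]
      apply List.map_congr_left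
      intro a _
      simp only [Function.comp_apply]
      congr 1
      push_cast
      exact Int.add_emod_left _ _
    rw [h1, h2, List.replicate_succ, List.flatten_cons, List.append_assoc]

theorem mp_alpha_len (site : Int) : ((mpAlphabet site).length : Int) = max site 0 := by
  simp [mpAlphabet, PySem.List.length_pyRange_one]

-- the heart of the equivalence: A's per-character map over range(cnt) equals B's
-- slice/repeat construction of the same circular run
theorem mp_seg_eq (site pos cnt : Int) (hs : 0 < site) (hc : 0 < cnt) :
    (PySem.List.pyRange 0 cnt 1).map
      (fun i => PySem.List.pyGetD (mpAlphabet site) (PySem.Int.mod (i + 2 + pos) site) "")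
    = mpSeg site (mpAlphabet site) pos cnt := by
  rw [mpSeg, if_neg (by omega)]
  have hL : ((mpAlphabet site).length : Int) = site := by rw [mp_alpha_len]; omega
  have hst0 : 0 ≤ PySem.Int.mod (2 + pos) site := PySem.Int.mod_nonneg _ hs
  have hstlt : PySem.Int.mod (2 + pos) site < site := PySem.Int.mod_lt _ hs
  set xs := mpAlphabet site with hxs
  set st := PySem.Int.mod (2 + pos) site with hst
  set sN := st.toNat with hsN
  have hsN' : (sN : Int) = st := Int.toNat_of_nonneg hst0
  have hlhs : (PySem.List.pyRange 0 cnt 1).map (fun i => PySem.List.pyGetD xs (PySem.Int.mod (i + 2 + pos) site) "")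
      = (List.range cnt.toNat).map (fun (k : Nat) => PySem.List.pyGetD xs (((k : Int) + (sN : Int)) % (xs.length : Int)) "") := by
    rw [PySem.List.pyRange_one, List.map_map, sub_zero]
    apply List.map_congr_left
    intro k _
    simp only [Function.comp_apply]
    have hidx : PySem.Int.mod ((0 + (k : Int)) + 2 + pos) site = ((k : Int) + (sN : Int)) % (xs.length : Int) := by
      rw [hL, hsN', hst, PySem.Int.mod_eq_emod_of_pos hs, PySem.Int.mod_eq_emod_of_pos hs]
      have h2 : (0 + (k : Int) + 2 + pos) = (k : Int) + (2 + pos) := by ring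
      rw [h2, Int.add_emod ((k : Int)) (2 + pos), Int.add_emod ((k : Int)) ((2 + pos) % site),
        Int.emod_emod_of_dvd _ dvd_rfl]
    rw [hidx]
  rw [hlhs]
  by_cases hb : cnt ≤ site - st
  · rw [if_pos hb, PySem.List.slice_toNat xs hst0 (by omega)]
    have h3 : (st + cnt).toNat - st.toNat = cnt.toNat := by omega
    rw [h3]
    exact mp_run_flat xs sN cnt.toNat (by omega)
  · rw [if_neg hb]
    set m := cnt - (site - st) with hm
    have hm0 : 0 < m := by omega
    set q := PySem.Int.floordiv m site with hq
    set r := PySem.Int.mod m site with hr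
    have hq0 : 0 ≤ q := by
      rw [hq, PySem.Int.floordiv_eq_ediv_of_pos hs]
      exact Int.ediv_nonneg (by omega) (by omega)
    have hr0 : 0 ≤ r := PySem.Int.mod_nonneg _ hs
    have hrlt : r < site := PySem.Int.mod_lt _ hs
    have hqr : q * site + r = m := PySem.Int.floordiv_mul_add_mod m site
    have hq' : (q.toNat : Int) = q := Int.toNat_of_nonneg hq0
    have hmul : ((q.toNat * xs.length : Nat) : Int) = q * site := by
      push_cast
      rw [hq', hL]
    have hsplitN : cnt.toNat = (xs.length - sN) + (q.toNat * xs.length + r.toNat) := by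
      omega
    rw [hsplitN, List.range_add, List.map_append, List.map_map]
    have h1 : (List.range (xs.length - sN)).map (fun (k : Nat) => PySem.List.pyGetD xs (((k : Int) + (sN : Int)) % (xs.length : Int)) "")
        = xs.drop sN := by
      rw [mp_run_flat xs sN (xs.length - sN) (by omega)]
      have h5 : xs.length - sN = (xs.drop sN).length := by simp
      rw [h5, List.take_length]
    have h2 : (List.range (q.toNat * xs.length + r.toNat)).map
        ((fun (k : Nat) => PySem.List.pyGetD xs (((k : Int) + (sN : Int)) % (xs.length : Int)) "") ∘ (fun x => xs.length - sN + x))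
        = (List.replicate q.toNat xs).flatten ++ xs.take r.toNat := by
      rw [← mp_cyc xs q.toNat r.toNat (by omega)]
      apply List.map_congr_left
      intro a _
      simp only [Function.comp_apply]
      have h4 : (((xs.length - sN + a : Nat) : Int) + (sN : Int)) % (xs.length : Int)
          = (a : Int) % (xs.length : Int) := by
        have h6 : ((xs.length - sN + a : Nat) : Int) + (sN : Int) = (xs.length : Int) + (a : Int) := by
          push_cast
          omega
        rw [h6]
        exact Int.add_emod_left _ _
      rw [h4]
    rw [h1, h2, PySem.List.slice_from xs hst0, PySem.List.slice_to xs hr0, ← hsN, List.append_assoc]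

-- loop alignment: A's fold over indices done.length … with partition = done ++ rest equals
-- B's fold over rest started at the running sum done.sum, for any shared window/accumulator.
theorem mp_loop_eq (site : Int) (rest : List Int) :
    ∀ (done : List Int) (acc : List (List String)) (cur : List String),
    (∀ x ∈ rest, 0 < site ∨ x ≤ 0) →
    ((PySem.List.pyRange (done.length : Int) (((done ++ rest).length : Int)) 1).foldl
        (mpStepA site (done ++ rest)) (acc, cur)).1
    = (rest.foldl (mpStepB site) (acc, cur, done.sum)).1 := by
  induction rest with
  | nil =>
    intro done acc cur _
    simp [PySem.List.pyRange_one_eq_nil (le_refl ((done.length : Int)))]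
  | cons cnt rest' ih =>
    intro done acc cur H
    have hcons : PySem.List.pyRange (done.length : Int) (((done ++ cnt :: rest').length : Int)) 1
        = (done.length : Int) :: PySem.List.pyRange ((done.length : Int) + 1) (((done ++ cnt :: rest').length : Int)) 1 := by
      apply PySem.List.pyRange_one_cons
      simp only [List.length_append, List.length_cons]
      push_cast
      omega
    rw [hcons, List.foldl_cons, List.foldl_cons]
    have hpos : (PySem.List.slice (done ++ cnt :: rest') (some 0) (some (done.length : Int))).sum = done.sum := by
      rw [PySem.List.slice_zero_start, PySem.List.slice_to_natCast, List.take_left]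
    have hget : PySem.List.pyGetD (done ++ cnt :: rest') ((done.length : Int)) 0 = cnt := by
      rw [PySem.List.pyGetD_natCast]
      simp [List.getD_eq_getElem?_getD]
    have hmap : (PySem.List.pyRange 0 (PySem.List.pyGetD (done ++ cnt :: rest') ((done.length : Int)) 0) 1).map
          (fun i => PySem.List.pyGetD (mpInitSeq site) (PySem.Int.mod (i + 2 + (PySem.List.slice (done ++ cnt :: rest') (some 0) (some (done.length : Int))).sum) site) "")
        = mpSeg site (mpAlphabet site) done.sum cnt := by
      rw [hget, hpos, mp_init_alpha]
      by_cases hc0 : cnt ≤ 0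
      · rw [PySem.List.pyRange_one_eq_nil hc0, mpSeg, if_pos hc0]
        simp
      · have hs : 0 < site := by
          rcases H cnt (List.mem_cons_self) with h | h
          · exact h
          · omega
        exact mp_seg_eq site done.sum cnt hs (by omega)
    have hA : mpStepA site (done ++ cnt :: rest') (acc, cur) ((done.length : Int))
        = (acc ++ [cur ++ mpSeg site (mpAlphabet site) done.sum cnt],
           PySem.List.slice (cur ++ mpSeg site (mpAlphabet site) done.sum cnt) (some (-2)) none) := by
      rw [mpStepA]
      simp only [hmap]
    have hB : mpStepB site (acc, cur, done.sum) cnt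
        = (acc ++ [cur ++ mpSeg site (mpAlphabet site) done.sum cnt],
           PySem.List.slice (cur ++ mpSeg site (mpAlphabet site) done.sum cnt) (some (-2)) none,
           done.sum + cnt) := by
      rw [mpStepB]
    rw [hA, hB]
    have hP : done ++ cnt :: rest' = (done ++ [cnt]) ++ rest' := by simp
    have h1 : (done.length : Int) + 1 = (((done ++ [cnt]).length : Int)) := by simp
    have h2 : done.sum + cnt = (done ++ [cnt]).sum := by simp
    rw [hP, h1, h2]
    exact ih (done ++ [cnt]) _ _ (fun x hx => H x (List.mem_cons_of_mem _ hx))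

-- ===== VERDICT (by name: the statement is the Claim_ definition above) =====
theorem make_paths_spec : Claim_equal_make_paths := by
  intro site partition _ hpre
  unfold Spec_make_paths make_paths make_paths_alt
  have H : ∀ x ∈ partition, 0 < site ∨ x ≤ 0 := by
    rcases hpre with ⟨h1, _⟩ | ⟨_, h2⟩
    · exact fun x _ => Or.inl h1
    · exact fun x hx => Or.inr (h2 x hx)
  have := mp_loop_eq site partition [] [] (PySem.List.slice (mpInitSeq site) none (some 2)) H
  simpa [mp_init_alpha site] using this
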